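-- pv_equiv track=rewrite | github.com/CAMeL-Lab/seq2seq-transliteration-tool | ai/datasets/base_dataset.py | goldTags
-- ===== SOURCE A (Python) =====
-- def goldTags(input_list):
--   """ Converts the GOLD input into a list that has tags seperate from normal characters
--   Example: input of "Ajyb[-]lkw" would be converted to
--   ['A', 'j', 'y', 'b', '[-]', 'l', 'k', 'w']
--   """
--   tags = ['[+]','[-]']
--   line = []
--
--   i = 0
--   while i < len(input_list):
--       if input_list[i] == "[" and input_list[i:i+3] in tags:
--           line.append(input_list[i:i+3])
--           i += 3
--       else:
--           line.append(input_list[i])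
--           i += 1
--
--   return line
-- ===== SOURCE B (Python) =====
-- def goldTags(input_list):
--   """Tokenize using str.find to jump straight to the next tag occurrence
--   instead of testing every position one character at a time."""
--   out = []
--   pos = 0
--   n = len(input_list)
--   while pos < n:
--     p1 = input_list.find('[+]', pos)
--     p2 = input_list.find('[-]', pos)
--     if p1 == -1:
--       nxt = p2
--     elif p2 == -1:
--       nxt = p1
--     else:
--       nxt = min(p1, p2)
--     if nxt == -1:
--       out.extend(input_list[pos:])
--       break
--     out.extend(input_list[pos:nxt])
--     out.append(input_list[nxt:nxt + 3])
--     pos = nxt + 3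
--   return out
-- ===== Notes on version B (the rewrite author's own statement) =====
-- stated objective: faster
-- what changed: Replaces A's per-character while-loop (which compares a 3-character slice against the tag list at every index) with a scanner that uses str.find to jump directly to the next bracket-tag occurrence and emits the intervening characters in bulk via extend.
import Mathlib
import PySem

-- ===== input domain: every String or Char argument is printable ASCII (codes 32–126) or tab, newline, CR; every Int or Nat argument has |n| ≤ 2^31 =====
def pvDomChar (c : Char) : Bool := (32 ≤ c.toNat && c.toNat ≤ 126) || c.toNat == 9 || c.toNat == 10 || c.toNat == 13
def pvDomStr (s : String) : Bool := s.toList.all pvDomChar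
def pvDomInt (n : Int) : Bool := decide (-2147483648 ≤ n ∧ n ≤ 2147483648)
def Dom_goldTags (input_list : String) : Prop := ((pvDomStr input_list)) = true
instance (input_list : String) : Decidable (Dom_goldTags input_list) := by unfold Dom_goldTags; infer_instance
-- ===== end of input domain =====

-- B replaces A's per-character while-loop scanner with str.find jumps to the next bracket-tag
-- occurrence (measured constant-factor speedup; same O(n) strategy class, no mutation).

-- ===== PORT A =====
-- tags = ['[+]','[-]']
def pvTagsA : List (List Char) := [['[', '+', ']'], ['[', '-', ']']]

-- the while-loop: i advances by 3 on a tag match, else by 1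
def pvScanA (s : List Char) (i : Nat) : List String :=
  if h : i < s.length then
    if (s[i] == '[') && pvTagsA.contains (PySem.List.slice s (some (i : Int)) (some ((i : Int) + 3))) then
      String.ofList (PySem.List.slice s (some (i : Int)) (some ((i : Int) + 3))) :: pvScanA s (i + 3)
    else
      String.ofList [s[i]] :: pvScanA s (i + 1)
  else []
termination_by s.length - i

def goldTags (input_list : String) : List String := pvScanA input_list.toList 0

-- ===== PORT B =====
-- find-based loop of Source B; fuel bounds the iteration count (pos grows by ≥ 3 each turn)
def pvScanB (s : List Char) (pos : Nat) (fuel : Nat) : List String :=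
  match fuel with
  | 0 => []
  | fuel + 1 =>
    if pos < s.length then
      let p1 := PySem.Chars.findFrom s ['[', '+', ']'] (pos : Int)
      let p2 := PySem.Chars.findFrom s ['[', '-', ']'] (pos : Int)
      let nxt := if p1 = -1 then p2 else if p2 = -1 then p1 else min p1 p2
      if nxt = -1 then
        (PySem.List.slice s (some (pos : Int)) (some (s.length : Int))).map (fun c => String.ofList [c])
      else
        (PySem.List.slice s (some (pos : Int)) (some nxt)).map (fun c => String.ofList [c]) ++
          String.ofList (PySem.List.slice s (some nxt) (some (nxt + 3))) :: pvScanB s (nxt.toNat + 3) fuel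
    else []

def goldTags_alt (input_list : String) : List String :=
  pvScanB input_list.toList 0 (input_list.toList.length + 1)

-- ===== PRECONDITION & SPEC =====
def Spec_goldTags (input_list : String) (out : List String) : Prop := out = goldTags_alt input_list
instance (input_list : String) (out : List String) : Decidable (Spec_goldTags input_list out) := by unfold Spec_goldTags; infer_instance

-- ===== CLAIM (what is proved, stated in full; the proofs are below) =====
def Claim_equal_goldTags : Prop := ∀ (input_list : String), Dom_goldTags input_list → Spec_goldTags input_list (goldTags input_list)

-- ===== LEMMAS AND PROOFS =====

-- a tag ('[+]' or '[-]') starts at position i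
def pvTagAt (s : List Char) (i : Nat) : Prop :=
  ['[', '+', ']'] <+: s.drop i ∨ ['[', '-', ']'] <+: s.drop i

theorem pvTagAt_lt_length {s : List Char} {i : Nat} (h : pvTagAt s i) : i + 3 ≤ s.length := by
  rcases h with h | h <;> have := h.length_le <;> simp [List.length_drop] at this <;> omega

theorem pvSlice3 (s : List Char) (i : Nat) :
    PySem.List.slice s (some (i : Int)) (some ((i : Int) + 3)) = (s.drop i).take 3 := by
  have : ((i : Int) + 3) = ((i + 3 : Nat) : Int) := by push_cast; ring
  rw [this, PySem.List.slice_natCast]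
  congr 1
  omega

theorem pvPrefix_take3 {s : List Char} {i : Nat} {t : List Char} (ht : t.length = 3) :
    t <+: s.drop i ↔ (3 ≤ s.length - i ∧ (s.drop i).take 3 = t) := by
  rw [List.prefix_iff_eq_take, ht]
  constructor
  · intro h
    have hl : (3 : Nat) ≤ (s.drop i).length := by
      by_contra hcon
      rw [List.take_of_length_le (by omega)] at h
      have hlen := congrArg List.length h
      rw [ht] at hlen
      omega
    rw [List.length_drop] at hl
    exact ⟨by omega, h.symm⟩
  · intro ⟨_, h⟩
    exact h.symm

theorem pvDropCons {s : List Char} {i : Nat} (h : i < s.length) :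
    s.drop i = s[i] :: s.drop (i + 1) :=
  List.drop_eq_getElem_cons h

-- A's branch condition is exactly "a tag starts at i"
theorem pvCondA_iff {s : List Char} {i : Nat} (h : i < s.length) :
    ((s[i] == '[') && pvTagsA.contains (PySem.List.slice s (some (i : Int)) (some ((i : Int) + 3)))) = true
      ↔ pvTagAt s i := by
  rw [pvSlice3]
  have hd := pvDropCons h
  constructor
  · intro hc
    simp [pvTagsA] at hc
    rcases hc.2 with hc2 | hc2
    · exact Or.inl (by rw [List.prefix_iff_eq_take]; simpa using hc2.symm)
    · exact Or.inr (by rw [List.prefix_iff_eq_take]; simpa using hc2.symm)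
  · intro ht
    have hc : List.take 3 (s.drop i) = ['[', '+', ']'] ∨ List.take 3 (s.drop i) = ['[', '-', ']'] := by
      rcases ht with hp | hp
      · exact Or.inl ((pvPrefix_take3 rfl).mp hp).2
      · exact Or.inr ((pvPrefix_take3 rfl).mp hp).2
    have hbr : s[i] = '[' := by
      rcases hc with hc2 | hc2 <;>
      · rw [hd, List.take_succ_cons] at hc2
        exact (List.cons_eq_cons.mp hc2).1
    simp [pvTagsA, hbr]
    rcases hc with hc2 | hc2 <;> simp [hc2]

-- segment with no tag start: A emits one singleton per character
theorem pvScanA_no_tag (s : List Char) (pos m : Nat) (hpm : pos ≤ m) (hm : m ≤ s.length)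
    (hno : ∀ j, pos ≤ j → j < m → ¬ pvTagAt s j) :
    pvScanA s pos = ((s.drop pos).take (m - pos)).map (fun c => String.ofList [c]) ++ pvScanA s m := by
  induction hk : m - pos generalizing pos with
  | zero =>
    have : pos = m := by omega
    subst this
    simp
  | succ k ih =>
    have hpl : pos < s.length := by omega
    rw [pvScanA]
    rw [dif_pos hpl]
    rw [if_neg (by
      intro hc
      exact hno pos le_rfl (by omega) ((pvCondA_iff hpl).mp hc))]
    rw [ih (pos + 1) (by omega) (fun j hj1 hj2 => hno j (by omega) hj2) (by omega)]
    rw [pvDropCons hpl, List.take_succ_cons]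
    simp

-- no occurrence of tag at or after pos, from find returning -1
theorem pvNoOcc {s tag : List Char} {pos : Nat} (hpos : pos ≤ s.length)
    (h : PySem.Chars.findFrom s tag (pos : Int) = -1) :
    ∀ j, pos ≤ j → ¬ tag <+: s.drop j := by
  intro j hj hpre
  rw [PySem.Chars.findFrom_natCast_eq_neg_one_iff s tag pos hpos] at h
  apply h
  have : s.drop j = (s.drop pos).drop (j - pos) := by
    rw [List.drop_drop]; congr 1; omega
  rw [this] at hpre
  exact List.IsInfix.trans hpre.isInfix ((List.drop_suffix _ _).isInfix)

-- the minimum-of-finds value points at the first tag occurrence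
theorem pvNextSpec {s : List Char} {pos : Nat} (hpos : pos ≤ s.length)
    (hne : (if PySem.Chars.findFrom s ['[', '+', ']'] (pos : Int) = -1 then
              PySem.Chars.findFrom s ['[', '-', ']'] (pos : Int)
            else if PySem.Chars.findFrom s ['[', '-', ']'] (pos : Int) = -1 then
              PySem.Chars.findFrom s ['[', '+', ']'] (pos : Int)
            else min (PySem.Chars.findFrom s ['[', '+', ']'] (pos : Int))
                     (PySem.Chars.findFrom s ['[', '-', ']'] (pos : Int))) ≠ -1) :
    (0 : Int) ≤ (if PySem.Chars.findFrom s ['[', '+', ']'] (pos : Int) = -1 then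
              PySem.Chars.findFrom s ['[', '-', ']'] (pos : Int)
            else if PySem.Chars.findFrom s ['[', '-', ']'] (pos : Int) = -1 then
              PySem.Chars.findFrom s ['[', '+', ']'] (pos : Int)
            else min (PySem.Chars.findFrom s ['[', '+', ']'] (pos : Int))
                     (PySem.Chars.findFrom s ['[', '-', ']'] (pos : Int))) ∧
    pos ≤ (if PySem.Chars.findFrom s ['[', '+', ']'] (pos : Int) = -1 then
              PySem.Chars.findFrom s ['[', '-', ']'] (pos : Int)
            else if PySem.Chars.findFrom s ['[', '-', ']'] (pos : Int) = -1 then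
              PySem.Chars.findFrom s ['[', '+', ']'] (pos : Int)
            else min (PySem.Chars.findFrom s ['[', '+', ']'] (pos : Int))
                     (PySem.Chars.findFrom s ['[', '-', ']'] (pos : Int))).toNat ∧
    pvTagAt s (if PySem.Chars.findFrom s ['[', '+', ']'] (pos : Int) = -1 then
              PySem.Chars.findFrom s ['[', '-', ']'] (pos : Int)
            else if PySem.Chars.findFrom s ['[', '-', ']'] (pos : Int) = -1 then
              PySem.Chars.findFrom s ['[', '+', ']'] (pos : Int)
            else min (PySem.Chars.findFrom s ['[', '+', ']'] (pos : Int))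
                     (PySem.Chars.findFrom s ['[', '-', ']'] (pos : Int))).toNat ∧
    ∀ j, pos ≤ j → j < (if PySem.Chars.findFrom s ['[', '+', ']'] (pos : Int) = -1 then
              PySem.Chars.findFrom s ['[', '-', ']'] (pos : Int)
            else if PySem.Chars.findFrom s ['[', '-', ']'] (pos : Int) = -1 then
              PySem.Chars.findFrom s ['[', '+', ']'] (pos : Int)
            else min (PySem.Chars.findFrom s ['[', '+', ']'] (pos : Int))
                     (PySem.Chars.findFrom s ['[', '-', ']'] (pos : Int))).toNat →
      ¬ pvTagAt s j := by
  by_cases h1 : PySem.Chars.findFrom s ['[', '+', ']'] (pos : Int) = -1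
  · rw [if_pos h1] at hne ⊢
    have hnoP := pvNoOcc hpos h1
    obtain ⟨ha, hb, hc⟩ := PySem.Chars.findFrom_natCast_spec s ['[', '-', ']'] pos hpos hne
    refine ⟨by omega, by omega, Or.inr hb, ?_⟩
    intro j hj hjlt ht
    rcases ht with ht | ht
    · exact hnoP j hj ht
    · exact hc j hj hjlt ht
  · rw [if_neg h1] at hne ⊢
    obtain ⟨ha1, hb1, hc1⟩ := PySem.Chars.findFrom_natCast_spec s ['[', '+', ']'] pos hpos h1
    by_cases h2 : PySem.Chars.findFrom s ['[', '-', ']'] (pos : Int) = -1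
    · rw [if_pos h2] at hne ⊢
      have hnoM := pvNoOcc hpos h2
      refine ⟨by omega, by omega, Or.inl hb1, ?_⟩
      intro j hj hjlt ht
      rcases ht with ht | ht
      · exact hc1 j hj hjlt ht
      · exact hnoM j hj ht
    · rw [if_neg h2] at hne ⊢
      obtain ⟨ha2, hb2, hc2⟩ := PySem.Chars.findFrom_natCast_spec s ['[', '-', ']'] pos hpos h2
      have hm1 := min_le_left (PySem.Chars.findFrom s ['[', '+', ']'] (pos : Int))
        (PySem.Chars.findFrom s ['[', '-', ']'] (pos : Int))
      have hm2 := min_le_right (PySem.Chars.findFrom s ['[', '+', ']'] (pos : Int))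
        (PySem.Chars.findFrom s ['[', '-', ']'] (pos : Int))
      refine ⟨by omega, by omega, ?_, ?_⟩
      · rcases min_cases (PySem.Chars.findFrom s ['[', '+', ']'] (pos : Int))
          (PySem.Chars.findFrom s ['[', '-', ']'] (pos : Int)) with hmc | hmc
        · rw [hmc.1]; exact Or.inl hb1
        · rw [hmc.1]; exact Or.inr hb2
      · intro j hj hjlt ht
        rcases ht with ht | ht
        · exact hc1 j hj (by omega) ht
        · exact hc2 j hj (by omega) ht

theorem pvSliceFull (s : List Char) (pos : Nat) :
    PySem.List.slice s (some (pos : Int)) (some (s.length : Int)) = s.drop pos := by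
  rw [show ((s.length : Int)) = ((s.length : Nat) : Int) from rfl, PySem.List.slice_natCast]
  exact List.take_of_length_le (by simp [List.length_drop])

-- main loop correspondence
theorem pvScan_eq (s : List Char) (fuel pos : Nat) (hf : s.length < pos + fuel) :
    pvScanA s pos = pvScanB s pos fuel := by
  induction fuel generalizing pos with
  | zero =>
    rw [pvScanA, pvScanB]
    rw [dif_neg (by omega)]
  | succ fuel ih =>
    by_cases hp : pos < s.length
    · rw [pvScanB]
      rw [if_pos hp]
      simp only []
      by_cases hn : (if PySem.Chars.findFrom s ['[', '+', ']'] (pos : Int) = -1 then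
              PySem.Chars.findFrom s ['[', '-', ']'] (pos : Int)
            else if PySem.Chars.findFrom s ['[', '-', ']'] (pos : Int) = -1 then
              PySem.Chars.findFrom s ['[', '+', ']'] (pos : Int)
            else min (PySem.Chars.findFrom s ['[', '+', ']'] (pos : Int))
                     (PySem.Chars.findFrom s ['[', '-', ']'] (pos : Int))) = -1
      · rw [if_pos hn]
        -- both finds are -1: no tag ever again
        have h1 : PySem.Chars.findFrom s ['[', '+', ']'] (pos : Int) = -1 := by
          by_cases h1 : PySem.Chars.findFrom s ['[', '+', ']'] (pos : Int) = -1
          · exact h1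
          · exfalso
            have hs1 := PySem.Chars.findFrom_natCast_spec s ['[', '+', ']'] pos hp.le h1
            rw [if_neg h1] at hn
            by_cases h2 : PySem.Chars.findFrom s ['[', '-', ']'] (pos : Int) = -1
            · rw [if_pos h2] at hn; exact h1 hn
            · have hs2 := PySem.Chars.findFrom_natCast_spec s ['[', '-', ']'] pos hp.le h2
              rw [if_neg h2] at hn
              rcases min_cases (PySem.Chars.findFrom s ['[', '+', ']'] (pos : Int))
                (PySem.Chars.findFrom s ['[', '-', ']'] (pos : Int)) with hmc | hmc <;>
                rw [hmc.1] at hn <;> [exact h1 hn; exact h2 hn]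
        have h2 : PySem.Chars.findFrom s ['[', '-', ']'] (pos : Int) = -1 := by
          rw [if_pos h1] at hn; exact hn
        have hno : ∀ j, pos ≤ j → ¬ pvTagAt s j := by
          intro j hj ht
          rcases ht with ht | ht
          · exact pvNoOcc hp.le h1 j hj ht
          · exact pvNoOcc hp.le h2 j hj ht
        rw [pvScanA_no_tag s pos s.length hp.le le_rfl (fun j hj _ => hno j hj)]
        rw [pvScanA, dif_neg (by omega)]
        rw [pvSliceFull s pos]
        simp [List.take_of_length_le]
      · rw [if_neg hn]
        obtain ⟨hn0, hnpos, hntag, hnmin⟩ := pvNextSpec hp.le hn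
        have hn3 := pvTagAt_lt_length hntag
        have hcast : (if PySem.Chars.findFrom s ['[', '+', ']'] (pos : Int) = -1 then
              PySem.Chars.findFrom s ['[', '-', ']'] (pos : Int)
            else if PySem.Chars.findFrom s ['[', '-', ']'] (pos : Int) = -1 then
              PySem.Chars.findFrom s ['[', '+', ']'] (pos : Int)
            else min (PySem.Chars.findFrom s ['[', '+', ']'] (pos : Int))
                     (PySem.Chars.findFrom s ['[', '-', ']'] (pos : Int)))
            = (((if PySem.Chars.findFrom s ['[', '+', ']'] (pos : Int) = -1 then
              PySem.Chars.findFrom s ['[', '-', ']'] (pos : Int)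
            else if PySem.Chars.findFrom s ['[', '-', ']'] (pos : Int) = -1 then
              PySem.Chars.findFrom s ['[', '+', ']'] (pos : Int)
            else min (PySem.Chars.findFrom s ['[', '+', ']'] (pos : Int))
                     (PySem.Chars.findFrom s ['[', '-', ']'] (pos : Int))).toNat : Nat) : Int) := by
          omega
        rw [hcast]
        rw [pvScanA_no_tag s pos _ hnpos (by omega) hnmin]
        rw [pvScanA]
        rw [dif_pos (show _ < s.length by omega)]
        rw [if_pos ((pvCondA_iff (by omega)).mpr hntag)]
        rw [ih _ (by omega)]
        rw [pvSlice3, PySem.List.slice_natCast, Int.toNat_natCast]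
    · rw [pvScanA, pvScanB, dif_neg hp, if_neg hp]

-- ===== VERDICT (by name: the statement is the Claim_ definition above) =====
theorem goldTags_spec : Claim_equal_goldTags := by
  intro s _
  unfold Spec_goldTags goldTags goldTags_alt
  exact pvScan_eq _ _ _ (by omega)
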